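-- pv_equiv track=rewrite | github.com/clhpeterson/ladymondegreen | rough_templates.py | consonant_cluster_templates
-- ===== SOURCE A (Python) =====
-- def consonant_cluster_templates (consonant_cluster):
-- 	to_return = []
-- 	if len (consonant_cluster) == 1:
-- 		of_interest = consonant_cluster[0]
-- 		to_return += [[["c"], [of_interest]], [["c", "v", "c"], [of_interest, "v", of_interest]]]
-- 	else:
-- 		of_interest = consonant_cluster[0]
-- 		all_variations = consonant_cluster_templates (consonant_cluster[1:])
-- 		for entry in all_variations:
-- 			to_return += [[entry[0], [of_interest] + entry[1]],[["c", "v"]+entry[0], [of_interest, "v"] + entry[1]], [["c", "v"]+entry[0], [of_interest, "v", of_interest] + entry[1]]]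
-- 	return to_return
-- ===== SOURCE B (Python) =====
-- def consonant_cluster_templates(consonant_cluster):
--     last = consonant_cluster[-1]
--     acc = [[["c"], [last]], [["c", "v", "c"], [last, "v", last]]]
--     for ch in reversed(consonant_cluster[:-1]):
--         acc = [ne for e in acc for ne in (
--             [e[0], [ch] + e[1]],
--             [["c", "v"] + e[0], [ch, "v"] + e[1]],
--             [["c", "v"] + e[0], [ch, "v", ch] + e[1]])]
--     return acc
-- ===== Notes on version B (the rewrite author's own statement) =====
-- stated objective: alternative
-- what changed: Replaced the recursion on the tail (with an inner foldl appending triples) by an explicit right-to-left fold: seed the accumulator from the last character and rebuild it with a flat comprehension for each earlier character.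
import Mathlib
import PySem

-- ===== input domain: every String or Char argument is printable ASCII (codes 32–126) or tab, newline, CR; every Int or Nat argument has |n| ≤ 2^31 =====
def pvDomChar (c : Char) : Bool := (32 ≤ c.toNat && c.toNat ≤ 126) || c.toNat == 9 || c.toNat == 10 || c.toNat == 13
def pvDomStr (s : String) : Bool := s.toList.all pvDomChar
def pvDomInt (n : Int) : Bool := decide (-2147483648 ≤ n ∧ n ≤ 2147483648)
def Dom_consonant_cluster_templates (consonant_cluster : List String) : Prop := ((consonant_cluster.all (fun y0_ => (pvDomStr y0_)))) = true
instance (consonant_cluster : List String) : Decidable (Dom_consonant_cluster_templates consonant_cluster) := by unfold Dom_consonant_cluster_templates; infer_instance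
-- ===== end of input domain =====

-- B replaces A's tail recursion (with an inner foldl appending triples) by an explicit
-- right-to-left fold seeded from the last character — objective: alternative decomposition.

-- ===== PORT A =====
-- recursion on the list: len == 1 is the base case; else recurse on the tail and
-- foldl-append the three expansions per entry ('to_return += [...]').
def consonant_cluster_templates : List String → List (List (List String))
  | [] => []   -- Python raises IndexError here; excluded by Pre_
  | [of_interest] =>
      [[["c"], [of_interest]], [["c", "v", "c"], [of_interest, "v", of_interest]]]
  | of_interest :: rest =>
      (consonant_cluster_templates rest).foldl
        (fun to_return entry =>
          to_return ++
            [[entry.getD 0 [], [of_interest] ++ entry.getD 1 []],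
             [["c", "v"] ++ entry.getD 0 [], [of_interest, "v"] ++ entry.getD 1 []],
             [["c", "v"] ++ entry.getD 0 [], [of_interest, "v", of_interest] ++ entry.getD 1 []]])
        []

-- ===== PORT B =====
-- explicit right-to-left fold: seed from the last character, then for each earlier
-- character rebuild the accumulator with a flat comprehension (flatMap).
def consonant_cluster_templates_alt (consonant_cluster : List String) : List (List (List String)) :=
  match consonant_cluster.getLast? with
  | none => []   -- Python B raises IndexError on []; excluded by Pre_
  | some last =>
      consonant_cluster.dropLast.foldr
        (fun ch acc =>
          acc.flatMap (fun e =>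
            [[e.getD 0 [], [ch] ++ e.getD 1 []],
             [["c", "v"] ++ e.getD 0 [], [ch, "v"] ++ e.getD 1 []],
             [["c", "v"] ++ e.getD 0 [], [ch, "v", ch] ++ e.getD 1 []]]))
        [[["c"], [last]], [["c", "v", "c"], [last, "v", last]]]

-- ===== PRECONDITION & SPEC =====
-- Pre_ excludes exactly the empty list, on which A raises IndexError (consonant_cluster[0]).
def Pre_consonant_cluster_templates (consonant_cluster : List String) : Prop :=
  consonant_cluster ≠ []
instance (consonant_cluster : List String) : Decidable (Pre_consonant_cluster_templates consonant_cluster) := by unfold Pre_consonant_cluster_templates; infer_instance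
def pvWitness_consonant_cluster_templates : List String := (["s", "t", "r"])

def Spec_consonant_cluster_templates (consonant_cluster : List String) (out : List (List (List String))) : Prop := out = consonant_cluster_templates_alt consonant_cluster
instance (consonant_cluster : List String) (out : List (List (List String))) : Decidable (Spec_consonant_cluster_templates consonant_cluster out) := by unfold Spec_consonant_cluster_templates; infer_instance

-- ===== CLAIM (what is proved, stated in full; the proofs are below) =====
def Claim_equal_consonant_cluster_templates : Prop := ∀ (consonant_cluster : List String), Dom_consonant_cluster_templates consonant_cluster → Pre_consonant_cluster_templates consonant_cluster → Spec_consonant_cluster_templates consonant_cluster (consonant_cluster_templates consonant_cluster)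

-- ===== LEMMAS AND PROOFS =====

-- A on a list of length ≥ 2 is the flatMap of the three expansions over A of the tail.
theorem pvA_cons (x y : String) (rest : List String) :
    consonant_cluster_templates (x :: y :: rest) =
      (consonant_cluster_templates (y :: rest)).flatMap (fun e =>
        [[e.getD 0 [], [x] ++ e.getD 1 []],
         [["c", "v"] ++ e.getD 0 [], [x, "v"] ++ e.getD 1 []],
         [["c", "v"] ++ e.getD 0 [], [x, "v", x] ++ e.getD 1 []]]) := by
  rw [show consonant_cluster_templates (x :: y :: rest) =
      (consonant_cluster_templates (y :: rest)).foldl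
        (fun to_return entry =>
          to_return ++
            [[entry.getD 0 [], [x] ++ entry.getD 1 []],
             [["c", "v"] ++ entry.getD 0 [], [x, "v"] ++ entry.getD 1 []],
             [["c", "v"] ++ entry.getD 0 [], [x, "v", x] ++ entry.getD 1 []]]) []
      from rfl]
  rw [PySem.List.foldl_append_eq_flatMap]
  simp

-- B on a list of length ≥ 2 peels one fold step off the front.
theorem pvB_cons (x y : String) (rest : List String) :
    consonant_cluster_templates_alt (x :: y :: rest) =
      (consonant_cluster_templates_alt (y :: rest)).flatMap (fun e =>
        [[e.getD 0 [], [x] ++ e.getD 1 []],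
         [["c", "v"] ++ e.getD 0 [], [x, "v"] ++ e.getD 1 []],
         [["c", "v"] ++ e.getD 0 [], [x, "v", x] ++ e.getD 1 []]]) := by
  unfold consonant_cluster_templates_alt
  rw [List.getLast?_cons_cons]
  cases h : (y :: rest).getLast? with
  | none => simp at h
  | some last => simp [List.dropLast]

theorem pv_agree : ∀ (cc : List String), cc ≠ [] →
    consonant_cluster_templates cc = consonant_cluster_templates_alt cc := by
  intro cc
  induction cc with
  | nil => intro h; exact absurd rfl h
  | cons x rest ih =>
    intro _
    cases rest with
    | nil => rfl
    | cons y rs => rw [pvA_cons, pvB_cons, ih (by simp)]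

-- ===== VERDICT (by name: the statement is the Claim_ definition above) =====
theorem consonant_cluster_templates_spec : Claim_equal_consonant_cluster_templates := by
  intro cc _ hpre
  exact pv_agree cc hpre
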